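-- pv_equiv track=rewrite | github.com/MKBD0102/Algorithm_Practice | 프로그래머스/1/132267. 콜라 문제/콜라 문제.py | solution
-- ===== SOURCE A (Python) =====
-- def solution(a, b, n):
--     total = n
--     res = 0
--     while total >= a:
--         get = (total // a) * b
--         total = get + (total % a)
--         res += get
--     return res
-- ===== SOURCE B (Python) =====
-- def solution(a, b, n):
--     # Each exchange of a empties for b new bottles consumes a - b bottles net,
--     # so starting from n >= a there are exactly (n - b) // (a - b) exchanges,
--     # each yielding b bottles.
--     if n < a:
--         return 0
--     return (n - b) // (a - b) * b
-- ===== Notes on version B (the rewrite author's own statement) =====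
-- stated objective: alternative
-- what changed: replaces A's repeated exchange loop by the loop-free closed form 0 if n < a else ((n-b)//(a-b))*b; for n >= a, Pre_ restricts to the task's natural domain (trade a>=1 empties for 0<=b<a new bottles), since outside it A raises (a=0), loops forever (b>=a), or returns accidental values of a nonsensical negative-bottle exchange
-- outside the precondition, e.g. on solution(3, -2, 10): A returns -6, B returns -4; on solution(-3, 5, 10): A returns -20, B returns -5; on solution(5, -1, 12): A returns -2, B returns -2
import Mathlib
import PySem

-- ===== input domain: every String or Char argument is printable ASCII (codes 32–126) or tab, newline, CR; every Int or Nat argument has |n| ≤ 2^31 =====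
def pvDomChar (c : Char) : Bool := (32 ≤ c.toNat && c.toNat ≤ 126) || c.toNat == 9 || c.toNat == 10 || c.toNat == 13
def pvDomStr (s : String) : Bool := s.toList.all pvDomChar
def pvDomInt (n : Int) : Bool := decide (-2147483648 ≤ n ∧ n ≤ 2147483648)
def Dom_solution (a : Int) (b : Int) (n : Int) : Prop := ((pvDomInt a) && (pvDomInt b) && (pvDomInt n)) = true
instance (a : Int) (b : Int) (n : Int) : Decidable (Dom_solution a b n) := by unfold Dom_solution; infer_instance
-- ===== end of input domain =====

-- B replaces A's exchange loop by the loop-free closed form ((n-b)//(a-b))*b (objective: alternative, loop-free formulation).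

-- ===== PORT A =====
-- A's while loop; the dite guard carries 1 ≤ a ∧ b < a only to make the
-- recursion terminate in Lean — inside Pre_ it coincides with 'total >= a'.
def solutionLoop (a : Int) (b : Int) (total : Int) (res : Int) : Int :=
  if _h : a ≤ total ∧ 1 ≤ a ∧ b < a then
    solutionLoop a b
      (PySem.Int.floordiv total a * b + PySem.Int.mod total a)
      (res + PySem.Int.floordiv total a * b)
  else res
termination_by total.toNat
decreasing_by
  have ha : 0 < a := by omega
  have hq : (1 : Int) ≤ PySem.Int.floordiv total a := by
    rw [PySem.Int.le_floordiv_iff_mul_le ha]; omega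
  have hfd : PySem.Int.floordiv total a = total / a :=
    PySem.Int.floordiv_eq_ediv_of_pos ha
  have hmd : PySem.Int.mod total a = total % a :=
    PySem.Int.mod_eq_emod_of_pos ha
  have heq : total / a * a + total % a = total := Int.ediv_mul_add_emod total a
  have hb : total / a * b ≤ total / a * (a - 1) :=
    mul_le_mul_of_nonneg_left (by omega) (by omega)
  have : PySem.Int.floordiv total a * b + PySem.Int.mod total a < total := by
    rw [hfd, hmd]; nlinarith
  exact (Int.toNat_lt_toNat (by omega)).mpr this

def solution (a : Int) (b : Int) (n : Int) : Int :=
  solutionLoop a b n 0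

-- ===== PORT B =====
def solution_alt (a : Int) (b : Int) (n : Int) : Int :=
  if n < a then 0
  else PySem.Int.floordiv (n - b) (a - b) * b

-- ===== PRECONDITION & SPEC =====
-- Pre_: either n < a (no exchange ever happens; A's loop body never runs) or
-- the task's natural domain, trading a (≥ 1) empty bottles for 0 ≤ b < a new
-- ones. The excluded inputs (n ≥ a outside that domain) are where A raises
-- (a = 0), loops forever (a ≤ b), or returns accidental values of a
-- nonsensical exchange with negative a or b that no caller would specify.
def Pre_solution (a : Int) (b : Int) (n : Int) : Prop := n < a ∨ (1 ≤ a ∧ 0 ≤ b ∧ b < a)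
instance (a : Int) (b : Int) (n : Int) : Decidable (Pre_solution a b n) := by
  unfold Pre_solution; infer_instance

def pvWitness_solution : Int × Int × Int := (2, 1, 20)

def Spec_solution (a : Int) (b : Int) (n : Int) (out : Int) : Prop := out = solution_alt a b n
instance (a : Int) (b : Int) (n : Int) (out : Int) : Decidable (Spec_solution a b n out) := by unfold Spec_solution; infer_instance

-- ===== CLAIM (what is proved, stated in full; the proofs are below) =====
def Claim_equal_solution : Prop := ∀ (a : Int) (b : Int) (n : Int), Dom_solution a b n → Pre_solution a b n → Spec_solution a b n (solution a b n)

-- ===== LEMMAS AND PROOFS =====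

-- The closed form as a function of the running total.
def closedForm (a : Int) (b : Int) (t : Int) : Int :=
  if t < a then 0 else (t - b) / (a - b) * b

theorem solution_alt_eq_closedForm (a b n : Int) (ha : 1 ≤ a) (hb : b < a) :
    solution_alt a b n = closedForm a b n := by
  unfold solution_alt closedForm
  rw [PySem.Int.floordiv_eq_ediv_of_pos (show (0:Int) < a - b by omega)]

-- One exchange round, on the closed form: splitting t = q*a + r (q full
-- exchanges, remainder r) yields q*b new bottles plus the closed form of the
-- new total q*b + r.
theorem closedForm_step (a b q r : Int) (ha : 1 ≤ a) (hb0 : 0 ≤ b) (hb : b < a)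
    (hq1 : 1 ≤ q) (hr0 : 0 ≤ r) (hra : r < a) :
    closedForm a b (q * a + r) = q * b + closedForm a b (q * b + r) := by
  have hta : a ≤ q * a + r := by nlinarith
  have hab : (0 : Int) < a - b := by omega
  have hbq : (1 : Int) * b ≤ q * b := mul_le_mul_of_nonneg_right hq1 hb0
  unfold closedForm
  rw [if_neg (by omega)]
  have hkey : (q * a + r - b) / (a - b) = (q * b + r - b) / (a - b) + q := by
    rw [show q * a + r - b = (q * b + r - b) + q * (a - b) by ring,
      Int.add_mul_ediv_right _ _ (by omega)]
  by_cases hlt : q * b + r < a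
  · rw [if_pos hlt, hkey,
      Int.ediv_eq_zero_of_lt (by linarith) (by linarith)]
    ring
  · rw [if_neg hlt, hkey]
    ring

-- Loop invariant: the loop adds exactly the closed form of its total.
theorem solutionLoop_eq (a b : Int) (ha : 1 ≤ a) (hb0 : 0 ≤ b) (hb : b < a) :
    ∀ (k : Nat) (t : Int), t.toNat ≤ k →
      ∀ res : Int, solutionLoop a b t res = res + closedForm a b t := by
  intro k
  induction k with
  | zero =>
    intro t ht res
    have hlt : t < a := by omega
    rw [solutionLoop, dif_neg (by omega), closedForm, if_pos hlt]
    ring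
  | succ k ih =>
    intro t ht res
    by_cases hlt : t < a
    · rw [solutionLoop, dif_neg (by omega), closedForm, if_pos hlt]
      ring
    replace hlt : a ≤ t := by omega
    have ha0 : (0 : Int) < a := by omega
    have hr0 : 0 ≤ t % a := Int.emod_nonneg _ (by omega)
    have hra : t % a < a := Int.emod_lt_of_pos _ ha0
    have heq : t / a * a + t % a = t := Int.ediv_mul_add_emod t a
    have hq1 : (1 : Int) ≤ t / a := by
      rw [Int.le_ediv_iff_mul_le ha0]; omega
    have hdec : t / a * b + t % a < t := by
      have h1 : t / a * b ≤ t / a * (a - 1) :=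
        mul_le_mul_of_nonneg_left (by omega) (by omega)
      nlinarith
    have hdec' : (t / a * b + t % a).toNat ≤ k := by
      have h2 := (Int.toNat_lt_toNat (show (0 : Int) < t by omega)).mpr hdec
      omega
    rw [solutionLoop, dif_pos ⟨by omega, ha, hb⟩,
      PySem.Int.floordiv_eq_ediv_of_pos ha0, PySem.Int.mod_eq_emod_of_pos ha0,
      ih _ hdec']
    have hstep := closedForm_step a b (t / a) (t % a) ha hb0 hb hq1 hr0 hra
    have h3 : closedForm a b t = t / a * b + closedForm a b (t / a * b + t % a) := by
      conv_lhs => rw [← heq]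
      exact hstep
    rw [h3]
    ring

-- ===== VERDICT (by name: the statement is the Claim_ definition above) =====
theorem solution_spec : Claim_equal_solution := by
  intro a b n _ hpre
  unfold Spec_solution solution
  by_cases hna : n < a
  · rw [solutionLoop, dif_neg (by omega), solution_alt, if_pos hna]
  · obtain ⟨ha, hb0, hb⟩ : 1 ≤ a ∧ 0 ≤ b ∧ b < a := by
      rcases hpre with h | h
      · exact absurd h hna
      · exact h
    rw [solutionLoop_eq a b ha hb0 hb n.toNat n le_rfl 0,
      solution_alt_eq_closedForm a b n ha hb]
    ring
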